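-- pv_equiv track=rewrite | github.com/asmit404/GFG_Solutions | Top k numbers in a stream.py | kTop
-- ===== SOURCE A (Python) =====
-- from collections import defaultdict
--
-- def kTop(arr, N, K):
--     dic, res = defaultdict(int), []
--     for a in arr:
--         dic[a] += 1
--         k = list(dic.keys())
--         k.sort(key=lambda x: (-dic[x], x))
--         i = k.index(0) if 0 in k else N
--         res.append(k[:min(K, i)])
--     return res
-- ===== SOURCE B (Python) =====
-- def kTop(arr, N, K):
--     # Maintains the (-count, value) pairs as an incrementally sorted list:
--     # each step removes one pair and re-inserts its incremented version,
--     # instead of re-sorting all keys at every step.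
--     cnt = {}
--     order = []  # (-count, value) pairs, kept in ascending (lexicographic) order
--     res = []
--     for a in arr:
--         c = cnt.get(a, 0)
--         if c:
--             order.remove((-c, a))
--         new = (-c - 1, a)
--         j = 0
--         while j < len(order) and order[j] < new:
--             j += 1
--         order.insert(j, new)
--         cnt[a] = c + 1
--         i = order.index((-cnt[0], 0)) if 0 in cnt else N
--         res.append([v for _, v in order[:min(K, i)]])
--     return res
-- ===== Notes on version B (the rewrite author's own statement) =====
-- stated objective: faster
-- what changed: B keeps the (-count, value) pairs in an incrementally maintained sorted list (one removal plus one ordered insertion per stream element) instead of rebuilding the key list and fully re-sorting it at every step as A does.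
import Mathlib
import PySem

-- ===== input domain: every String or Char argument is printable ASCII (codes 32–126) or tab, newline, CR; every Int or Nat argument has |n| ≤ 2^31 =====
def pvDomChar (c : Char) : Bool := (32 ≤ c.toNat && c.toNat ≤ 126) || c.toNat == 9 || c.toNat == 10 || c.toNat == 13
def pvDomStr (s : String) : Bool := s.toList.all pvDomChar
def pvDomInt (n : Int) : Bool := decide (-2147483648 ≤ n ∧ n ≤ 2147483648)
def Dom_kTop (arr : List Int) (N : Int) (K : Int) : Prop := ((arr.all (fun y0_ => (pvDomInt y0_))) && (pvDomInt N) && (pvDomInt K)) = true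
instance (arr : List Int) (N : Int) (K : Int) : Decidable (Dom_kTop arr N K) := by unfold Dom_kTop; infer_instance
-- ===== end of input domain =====

-- B maintains the (-count, value) pairs as an incrementally sorted list (one removal + one
-- ordered insertion per element) instead of re-sorting all keys at every step (objective: faster).

-- ===== PORT A =====
-- loop body of A: dic[a] += 1; k = sorted keys by (-count, key); i = k.index(0) if 0 in k else N; append k[:min(K,i)]
def kTopStep (N : Int) (K : Int) (st : PySem.Dict Int Int × List (List Int)) (a : Int) :
    PySem.Dict Int Int × List (List Int) :=
  let dic := st.1.modify a 0 (· + 1)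
  let k := PySem.List.sorted2 dic.keys (fun x => -(dic.getD x 0)) (fun x => x)
  -- 'k.index(0) if 0 in k else N': index? is some exactly when 0 ∈ k
  let i : Int := match PySem.List.index? k 0 with
    | some j => (j : Int)
    | none => N
  (dic, st.2 ++ [PySem.List.slice k none (some (min K i))])

def kTop (arr : List Int) (N : Int) (K : Int) : List (List Int) :=
  (arr.foldl (kTopStep N K) (PySem.Dict.empty, [])).2

-- ===== PORT B =====
-- Python tuple '<' on (Int, Int) pairs (lexicographic)
def pvLexLt (p q : Int × Int) : Bool := p.1 < q.1 || (p.1 == q.1 && p.2 < q.2)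

-- B's while-loop insertion: advance past elements < x, insert x there (exact transliteration)
def pvInsSorted (x : Int × Int) : List (Int × Int) → List (Int × Int)
  | [] => [x]
  | y :: ys => if pvLexLt y x then y :: pvInsSorted x ys else x :: y :: ys

-- loop body of B
def kTopAltStep (N : Int) (K : Int) (st : PySem.Dict Int Int × List (Int × Int) × List (List Int))
    (a : Int) : PySem.Dict Int Int × List (Int × Int) × List (List Int) :=
  let c := st.1.getD a 0
  -- 'if c: order.remove((-c, a))' — the pair is present whenever c ≠ 0, so the getD default is unreachable
  let ord1 := if c ≠ 0 then (PySem.List.remove? st.2.1 (-c, a)).getD st.2.1 else st.2.1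
  let ord2 := pvInsSorted (-c - 1, a) ord1
  let cnt := st.1.insert a (c + 1)
  -- 'order.index((-cnt[0], 0)) if 0 in cnt else N' — the pair is in ord2 whenever 0 ∈ cnt, so getD 0 is unreachable
  let i : Int := if cnt.contains 0 then
      ((PySem.List.index? ord2 (-(cnt.getD 0 0), 0)).getD 0 : Int)
    else N
  (cnt, ord2, st.2.2 ++ [(PySem.List.slice ord2 none (some (min K i))).map (·.2)])

def kTop_alt (arr : List Int) (N : Int) (K : Int) : List (List Int) :=
  (arr.foldl (kTopAltStep N K) (PySem.Dict.empty, [], [])).2.2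

-- ===== PRECONDITION & SPEC =====
def Spec_kTop (arr : List Int) (N : Int) (K : Int) (out : List (List Int)) : Prop := out = kTop_alt arr N K
instance (arr : List Int) (N : Int) (K : Int) (out : List (List Int)) : Decidable (Spec_kTop arr N K out) := by unfold Spec_kTop; infer_instance

-- ===== CLAIM (what is proved, stated in full; the proofs are below) =====
def Claim_equal_kTop : Prop := ∀ (arr : List Int) (N : Int) (K : Int), Dom_kTop arr N K → Spec_kTop arr N K (kTop arr N K)

-- ===== LEMMAS AND PROOFS =====

def pvG (p : Int × Int) : Int × Int := (-p.2, p.1)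
def pvInv (d : PySem.Dict Int Int) (ord : List (Int × Int)) : Prop :=
  d.keys.Nodup ∧ (∀ p ∈ d.items, 1 ≤ p.2) ∧ ord.Perm (d.items.map pvG) ∧
    ord.Pairwise (fun p q => toLex p < toLex q)

theorem pvLexLt_iff (p q : Int × Int) : pvLexLt p q = true ↔ toLex p < toLex q := by
  simp [pvLexLt, Prod.Lex.toLex_lt_toLex]
theorem pvInsSorted_perm (x : Int × Int) (l : List (Int × Int)) :
    (pvInsSorted x l).Perm (x :: l) := by
  induction l with
  | nil => simp [pvInsSorted]
  | cons y ys ih =>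
    simp only [pvInsSorted]
    split
    · exact ((ih.cons y).trans (List.Perm.swap x y ys))
    · exact List.Perm.refl _
theorem pvInsSorted_mem {z x : Int × Int} {l : List (Int × Int)} (h : z ∈ pvInsSorted x l) :
    z = x ∨ z ∈ l := by
  have := (pvInsSorted_perm x l).mem_iff.mp h
  simpa using this
theorem pvInsSorted_pairwise (x : Int × Int) (l : List (Int × Int))
    (hp : l.Pairwise (fun p q => toLex p < toLex q)) (hne : ∀ y ∈ l, y ≠ x) :
    (pvInsSorted x l).Pairwise (fun p q => toLex p < toLex q) := by
  induction l with
  | nil => simp [pvInsSorted]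
  | cons y ys ih =>
    rw [List.pairwise_cons] at hp
    simp only [pvInsSorted]
    split
    · rename_i hlt
      refine List.pairwise_cons.mpr ⟨?_, ih hp.2 (fun z hz => hne z (List.mem_cons_of_mem _ hz))⟩
      intro z hz
      rcases pvInsSorted_mem hz with rfl | hz'
      · exact (pvLexLt_iff y z).mp hlt
      · exact hp.1 z hz'
    · rename_i hnlt
      have hyx : ¬ toLex y < toLex x := fun h => hnlt ((pvLexLt_iff y x).mpr h)
      have hxy : toLex x < toLex y := by
        rcases lt_trichotomy (toLex x) (toLex y) with h | h | h
        · exact h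
        · exact absurd (toLex.injective h).symm (hne y (List.mem_cons_self))
        · exact absurd h hyx
      refine List.pairwise_cons.mpr ⟨?_, List.pairwise_cons.mpr hp⟩
      intro z hz
      rcases List.mem_cons.mp hz with rfl | hz'
      · exact hxy
      · exact hxy.trans (hp.1 z hz')
theorem pv_map_slice (xs : List (Int × Int)) (m : Int) :
    (PySem.List.slice xs none (some m)).map (·.2) =
      PySem.List.slice (xs.map (·.2)) none (some m) := by
  simp [PySem.List.slice, List.map_take]
theorem pv_index_snd (xs : List (Int × Int)) (p : Int × Int)
    (hnd : (xs.map (·.2)).Nodup) (hm : p ∈ xs) :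
    PySem.List.index? (xs.map (·.2)) p.2 = PySem.List.index? xs p := by
  induction xs with
  | nil => simp at hm
  | cons q t ih =>
    by_cases hq : q = p
    · subst hq
      rw [List.map_cons, PySem.List.index?_cons_self, PySem.List.index?_cons_self]
    · have hpt : p ∈ t := by rcases List.mem_cons.mp hm with h | h; exact absurd h.symm hq; exact h
      have hnd' : (t.map (·.2)).Nodup := (List.nodup_cons.mp (by simpa using hnd)).2
      have hq2 : q.2 ≠ p.2 := by
        intro h
        have : q.2 ∉ t.map (·.2) := (List.nodup_cons.mp (by simpa using hnd)).1
        exact this (h ▸ List.mem_map_of_mem hpt)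
      rw [List.map_cons, PySem.List.index?_cons_of_ne _ hq2,
          PySem.List.index?_cons_of_ne _ hq, ih hnd' hpt]

theorem pv_update (d : PySem.Dict Int Int) (ord : List (Int × Int)) (a : Int) (h : pvInv d ord) :
    pvInv (d.insert a (d.getD a 0 + 1))
      (pvInsSorted (-(d.getD a 0) - 1, a)
        (if d.getD a 0 ≠ 0 then (PySem.List.remove? ord (-(d.getD a 0), a)).getD ord else ord)) := by
  obtain ⟨hnd, hpos, hperm, hpair⟩ := h
  by_cases hca : d.contains a = true
  · -- a already counted
    obtain ⟨v, hget⟩ : ∃ v, d.get? a = some v := by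
      have := PySem.Dict.contains_eq_isSome_get? d a
      rw [hca] at this
      exact Option.isSome_iff_exists.mp this.symm
    have hgetD : d.getD a 0 = v := PySem.Dict.getD_of_get?_eq_some d 0 hget
    have hmemit : (a, v) ∈ d.items := PySem.Dict.mem_items_of_get?_eq_some d hget
    have hv1 : 1 ≤ v := hpos _ hmemit
    obtain ⟨u, w, huw⟩ := List.append_of_mem hmemit
    have hndk : ((u ++ (a, v) :: w).map (·.1)).Nodup := by
      have : d.keys = d.items.map (·.1) := rfl
      rw [this, huw] at hnd; exact hnd
    rw [List.map_append, List.map_cons] at hndk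
    rcases List.nodup_append.mp hndk with ⟨hnu, hnaw, hdisj⟩
    have ha_u : ∀ p ∈ u, p.1 ≠ a := by
      intro p hp hpa
      exact hdisj _ (List.mem_map_of_mem hp) _ (by simp) hpa
    have ha_w : ∀ p ∈ w, p.1 ≠ a := by
      intro p hp hpa
      have : a ∉ w.map (·.1) := (List.nodup_cons.mp hnaw).1
      exact this (hpa ▸ List.mem_map_of_mem hp)
    have hitems' : (d.insert a (d.getD a 0 + 1)).items = u ++ (a, v + 1) :: w := by
      rw [hgetD, PySem.Dict.items_insert_of_contains d (v + 1) hca, huw,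
        List.map_append, List.map_cons]
      congr 1
      · have := List.map_congr_left (l := u)
          (f := fun p : Int × Int => if p.1 == a then (a, v + 1) else p) (g := id)
          (fun p hp => by simp [ha_u p hp])
        simpa using this
      · congr 1
        · simp
        · have := List.map_congr_left (l := w)
            (f := fun p : Int × Int => if p.1 == a then (a, v + 1) else p) (g := id)
            (fun p hp => by simp [ha_w p hp])
          simpa using this
    have hLname : d.items.map pvG = u.map pvG ++ (-v, a) :: w.map pvG := by
      rw [huw, List.map_append, List.map_cons]; rfl
    have hvne0 : d.getD a 0 ≠ 0 := by omega
    have hmem_ord : (-(d.getD a 0), a) ∈ ord := by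
      rw [hgetD]
      exact hperm.mem_iff.mpr (by rw [hLname]; exact List.mem_append_right _ List.mem_cons_self)
    have hord1 : (if d.getD a 0 ≠ 0 then (PySem.List.remove? ord (-(d.getD a 0), a)).getD ord else ord)
        = ord.erase (-(d.getD a 0), a) := by
      rw [if_pos hvne0, PySem.List.remove?_eq_some_erase ord _ hmem_ord]; rfl
    have hnotu : (-v, a) ∉ u.map pvG := by
      intro hmm
      obtain ⟨p, hp, hpe⟩ := List.mem_map.mp hmm
      exact ha_u p hp (congrArg Prod.snd hpe)
    have herase : (d.items.map pvG).erase (-(d.getD a 0), a) = u.map pvG ++ w.map pvG := by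
      rw [hgetD, hLname, List.erase_append_right _ hnotu, List.erase_cons_head]
    have hperm1 : (ord.erase (-(d.getD a 0), a)).Perm (u.map pvG ++ w.map pvG) := by
      rw [← herase]; exact hperm.erase _
    have hpair1 : (ord.erase (-(d.getD a 0), a)).Pairwise (fun p q => toLex p < toLex q) :=
      hpair.sublist (List.erase_sublist)
    have hne1 : ∀ y ∈ ord.erase (-(d.getD a 0), a), y ≠ (-(d.getD a 0) - 1, a) := by
      intro y hy hye
      have hy2 : y ∈ u.map pvG ++ w.map pvG := hperm1.mem_iff.mp hy
      rcases List.mem_append.mp hy2 with hyu | hyw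
      · obtain ⟨p, hp, hpe⟩ := List.mem_map.mp hyu
        exact ha_u p hp (by have := congrArg Prod.snd (hpe.trans hye); simpa [pvG] using this)
      · obtain ⟨p, hp, hpe⟩ := List.mem_map.mp hyw
        exact ha_w p hp (by have := congrArg Prod.snd (hpe.trans hye); simpa [pvG] using this)
    refine ⟨?_, ?_, ?_, ?_⟩
    · exact PySem.Dict.nodup_keys_insert d a _ hnd
    · intro p hp
      rcases (PySem.Dict.mem_items_insert d a _ p).mp hp with rfl | ⟨hp', _⟩
      · simp; omega
      · exact hpos _ hp'
    · rw [hord1, hitems', List.map_append, List.map_cons]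
      refine ((pvInsSorted_perm _ _).trans ?_)
      refine (List.Perm.cons _ hperm1).trans ?_
      have : pvG (a, v + 1) = (-v - 1, a) := by simp [pvG]; ring
      rw [this]
      have h2 : (-(d.getD a 0) - 1, a) = (-v - 1 , a) := by rw [hgetD]
      rw [h2]
      exact List.perm_middle.symm
    · rw [hord1]
      exact pvInsSorted_pairwise _ _ hpair1 hne1
  · -- a is new
    have hcf : d.contains a = false := by simpa using hca
    have hc0 : d.getD a 0 = 0 := PySem.Dict.getD_of_not_contains d 0 hcf
    have hord1 : (if d.getD a 0 ≠ 0 then (PySem.List.remove? ord (-(d.getD a 0), a)).getD ord else ord)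
        = ord := by rw [if_neg (by omega)]
    have hanotk : a ∉ d.keys := by
      intro hk
      rw [(PySem.Dict.contains_iff_mem_keys d a).mpr hk] at hcf
      simp at hcf
    have hitems' : (d.insert a (d.getD a 0 + 1)).items = d.items ++ [(a, d.getD a 0 + 1)] :=
      PySem.Dict.items_insert_of_not_contains d _ hcf
    have hne1 : ∀ y ∈ ord, y ≠ (-(d.getD a 0) - 1, a) := by
      intro y hy hye
      have : y ∈ d.items.map pvG := hperm.mem_iff.mp hy
      obtain ⟨p, hp, hpe⟩ := List.mem_map.mp this
      apply hanotk
      have : d.keys = d.items.map (·.1) := rfl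
      rw [this]
      have : p.1 = a := by have := congrArg Prod.snd (hpe.trans hye); simpa [pvG] using this
      exact this ▸ List.mem_map_of_mem hp
    refine ⟨PySem.Dict.nodup_keys_insert d a _ hnd, ?_, ?_, ?_⟩
    · intro p hp
      rcases (PySem.Dict.mem_items_insert d a _ p).mp hp with rfl | ⟨hp', _⟩
      · simp; omega
      · exact hpos _ hp'
    · rw [hord1, hitems', List.map_append]
      refine ((pvInsSorted_perm _ _).trans ?_)
      refine (List.Perm.cons _ hperm).trans ?_
      have : List.map pvG [(a, d.getD a 0 + 1)] = [(-(d.getD a 0) - 1, a)] := by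
        simp [pvG]; ring
      rw [this]
      exact (List.perm_append_singleton _ _).symm
    · rw [hord1]
      exact pvInsSorted_pairwise _ _ hpair hne1


theorem pv_foldl_pairwise (key : Int → Lex (Int × Int)) (xs : List Int) :
    ∀ acc : List Int, acc.Pairwise (fun a b => key a ≤ key b) →
      (xs.foldl (fun acc x => PySem.List.insertBy (fun a b => decide (key a < key b)) x acc) acc).Pairwise
        (fun a b => key a ≤ key b) := by
  induction xs with
  | nil => intro acc h; exact h
  | cons x t ih =>
    intro acc h
    exact ih _ (PySem.List.insertBy_pairwise_le key x acc h)
theorem pv_sorted2_eq (xs ys : List Int) (k1 : Int → Int)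
    (hperm : ys.Perm xs)
    (hpair : ys.Pairwise (fun a b => k1 a < k1 b ∨ (k1 a = k1 b ∧ a < b))) :
    PySem.List.sorted2 xs k1 (fun x => x) = ys := by
  set key : Int → Lex (Int × Int) := fun a => toLex (k1 a, a) with hkey
  have hcomp : (fun a b : Int => decide (k1 a < k1 b) || (!decide (k1 b < k1 a) && decide (a < b)))
      = (fun a b : Int => decide (key a < key b)) := by
    funext a b
    by_cases h1 : k1 a < k1 b <;> by_cases h2 : k1 b < k1 a <;> by_cases h3 : a < b <;>
      simp [hkey, h1, h2, h3, Prod.Lex.toLex_lt_toLex] <;> omega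
  have hlt_iff : ∀ a b : Int, (k1 a < k1 b ∨ (k1 a = k1 b ∧ a < b)) ↔ key a < key b := by
    intro a b; rw [hkey]; simp [Prod.Lex.toLex_lt_toLex]
  have hsorted2 : PySem.List.sorted2 xs k1 (fun x => x)
      = xs.foldl (fun acc x => PySem.List.insertBy (fun a b => decide (key a < key b)) x acc) [] := by
    show List.foldl (fun acc x => PySem.List.insertBy (fun a b : Int =>
        decide (k1 a < k1 b) || (!decide (k1 b < k1 a) && decide (a < b))) x acc) [] xs = _
    rw [hcomp]
  have hp1 : (PySem.List.sorted2 xs k1 (fun x => x)).Pairwise (fun a b => key a ≤ key b) := by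
    rw [hsorted2]; exact pv_foldl_pairwise key xs [] (by simp)
  have hp2 : ys.Pairwise (fun a b => key a ≤ key b) :=
    hpair.imp (fun h => le_of_lt ((hlt_iff _ _).mp h))
  have hperm2 : (PySem.List.sorted2 xs k1 (fun x => x)).Perm ys :=
    (PySem.List.sorted2_perm xs k1 (fun x => x) false).trans hperm.symm
  refine List.Perm.eq_of_pairwise ?_ hp1 hp2 hperm2
  intro a b _ _ h1 h2
  have : key a = key b := le_antisymm h1 h2
  have := toLex.injective this
  exact congrArg Prod.snd this

theorem pv_keyfact (d : PySem.Dict Int Int) (ord : List (Int × Int)) (h : pvInv d ord) :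
    ∀ p ∈ ord, d.getD p.2 0 = -p.1 := by
  obtain ⟨hnd, _, hperm, _⟩ := h
  intro p hp
  obtain ⟨q, hq, hqe⟩ := List.mem_map.mp (hperm.mem_iff.mp hp)
  obtain ⟨k, v⟩ := q
  have h1 : p.1 = -v := by rw [← hqe]; rfl
  have h2 : p.2 = k := by rw [← hqe]; rfl
  rw [h1, h2, PySem.Dict.getD_of_mem_items d hq hnd, neg_neg]

theorem pv_snd_perm_keys (d : PySem.Dict Int Int) (ord : List (Int × Int)) (h : pvInv d ord) :
    (ord.map (·.2)).Perm d.keys := by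
  obtain ⟨_, _, hperm, _⟩ := h
  have := hperm.map (·.2)
  rw [List.map_map] at this
  exact this

theorem pv_sorted_eq (d : PySem.Dict Int Int) (ord : List (Int × Int)) (h : pvInv d ord) :
    PySem.List.sorted2 d.keys (fun x => -(d.getD x 0)) (fun x => x) = ord.map (·.2) := by
  have hkf := pv_keyfact d ord h
  refine pv_sorted2_eq _ _ _ (pv_snd_perm_keys d ord h) ?_
  refine List.pairwise_map.mpr ?_
  refine h.2.2.2.imp_of_mem ?_
  intro p q hp hq hlt
  rw [Prod.Lex.toLex_lt_toLex] at hlt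
  rw [hkf p hp, hkf q hq]
  omega

theorem pv_index_eq (d : PySem.Dict Int Int) (ord : List (Int × Int)) (h : pvInv d ord) (N : Int) :
    (match PySem.List.index? (ord.map (·.2)) 0 with
      | some j => (j : Int)
      | none => N) =
    (if d.contains 0 then ((PySem.List.index? ord (-(d.getD 0 0), 0)).getD 0 : Int) else N) := by
  by_cases h0 : d.contains 0 = true
  · obtain ⟨v, hget⟩ : ∃ v, d.get? 0 = some v := by
      have := PySem.Dict.contains_eq_isSome_get? d 0
      rw [h0] at this
      exact Option.isSome_iff_exists.mp this.symm
    have hgetD : d.getD 0 0 = v := PySem.Dict.getD_of_get?_eq_some d 0 hget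
    have hp0 : ((-v, 0) : Int × Int) ∈ ord := by
      refine h.2.2.1.mem_iff.mpr ?_
      exact List.mem_map.mpr ⟨(0, v), PySem.Dict.mem_items_of_get?_eq_some d hget, rfl⟩
    have hsnd : (ord.map (·.2)).Nodup :=
      ((pv_snd_perm_keys d ord h).nodup_iff).mpr h.1
    have hidx : PySem.List.index? (ord.map (·.2)) 0 = PySem.List.index? ord (-v, 0) :=
      pv_index_snd ord (-v, 0) hsnd hp0
    obtain ⟨j, hj⟩ : ∃ j, PySem.List.index? ord (-v, 0) = some j :=
      Option.isSome_iff_exists.mp ((PySem.List.index?_isSome_iff ord _).mpr hp0)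
    rw [if_pos h0, hgetD, hidx, hj]
    rfl
  · have h0f : d.contains 0 = false := by simpa using h0
    have hnk : (0 : Int) ∉ d.keys := by
      intro hk
      rw [(PySem.Dict.contains_iff_mem_keys d 0).mpr hk] at h0f
      simp at h0f
    have : (0 : Int) ∉ ord.map (·.2) := fun hm => hnk ((pv_snd_perm_keys d ord h).mem_iff.mp hm)
    rw [(PySem.List.index?_eq_none_iff _ _).mpr this, if_neg (by simp [h0f])]

theorem pv_step (N K : Int) (d : PySem.Dict Int Int) (ord : List (Int × Int))
    (res : List (List Int)) (a : Int) (h : pvInv d ord) :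
    pvInv (kTopAltStep N K (d, ord, res) a).1 (kTopAltStep N K (d, ord, res) a).2.1 ∧
      kTopStep N K (d, res) a =
        ((kTopAltStep N K (d, ord, res) a).1, (kTopAltStep N K (d, ord, res) a).2.2) := by
  have hupd := pv_update d ord a h
  set ord2 := pvInsSorted (-(d.getD a 0) - 1, a)
      (if d.getD a 0 ≠ 0 then (PySem.List.remove? ord (-(d.getD a 0), a)).getD ord else ord) with hord2
  have hstep : (kTopAltStep N K (d, ord, res) a).1 = d.insert a (d.getD a 0 + 1) := rfl
  have hstep2 : (kTopAltStep N K (d, ord, res) a).2.1 = ord2 := rfl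
  refine ⟨by rw [hstep, hstep2]; exact hupd, ?_⟩
  have hInv' : pvInv (d.insert a (d.getD a 0 + 1)) ord2 := hupd
  have hk : PySem.List.sorted2 (d.insert a (d.getD a 0 + 1)).keys
      (fun x => -((d.insert a (d.getD a 0 + 1)).getD x 0)) (fun x => x) = ord2.map (·.2) :=
    pv_sorted_eq _ _ hInv'
  have hi := pv_index_eq (d.insert a (d.getD a 0 + 1)) ord2 hInv' N
  show (d.modify a 0 (· + 1),
      res ++ [PySem.List.slice (PySem.List.sorted2 (d.modify a 0 (· + 1)).keys
        (fun x => -((d.modify a 0 (· + 1)).getD x 0)) (fun x => x)) none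
        (some (min K (match PySem.List.index? (PySem.List.sorted2 (d.modify a 0 (· + 1)).keys
          (fun x => -((d.modify a 0 (· + 1)).getD x 0)) (fun x => x)) 0 with
          | some j => (j : Int)
          | none => N)))]) = _
  have hmod : d.modify a 0 (· + 1) = d.insert a (d.getD a 0 + 1) := rfl
  rw [hmod, hk, hi]
  rw [← pv_map_slice]
  rfl

theorem pv_fold (N K : Int) (arr : List Int) :
    ∀ (d : PySem.Dict Int Int) (ord : List (Int × Int)) (res : List (List Int)),
      pvInv d ord →
      (arr.foldl (kTopStep N K) (d, res)).2 = (arr.foldl (kTopAltStep N K) (d, ord, res)).2.2 := by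
  induction arr with
  | nil => intro d ord res _; rfl
  | cons a t ih =>
    intro d ord res h
    have hs := pv_step N K d ord res a h
    simp only [List.foldl_cons]
    rw [hs.2]
    exact ih _ _ _ hs.1

theorem pvInv_empty : pvInv PySem.Dict.empty [] := by
  refine ⟨by simp [PySem.Dict.keys, PySem.Dict.empty], by simp [PySem.Dict.empty], ?_, by simp⟩
  simp [PySem.Dict.empty]

-- ===== VERDICT (by name: the statement is the Claim_ definition above) =====
theorem kTop_spec : Claim_equal_kTop := by
  intro arr N K _
  unfold Spec_kTop kTop kTop_alt
  exact pv_fold N K arr PySem.Dict.empty [] [] pvInv_empty
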